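-- pv_equiv track=rewrite | github.com/FernandoFdeS/alocador_de_salas | verifica_solucao.py | verifica_repeticao
-- ===== SOURCE A (Python) =====
-- def verifica_repeticao(blocoHorarios):
--     horarios = []
--
--     # Pegando apenas os horários
--     for item in blocoHorarios:
--         indice_hifen = item.find('-')
--         horario = item[indice_hifen+1:]
--         horarios.append(horario)
--
--     # Verifica se há repetição em pelo menos um caractere entre todos as faixas de horario
--     for i in range(len(horarios)):
--         for j in range(i+1, len(horarios)):
--             for char in horarios[i]:
--                 if char in horarios[j]:
--                     return True
--
--     return False
-- ===== SOURCE B (Python) =====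
-- def verifica_repeticao(blocoHorarios):
--     vistos = set()
--     for item in blocoHorarios:
--         horario = item[item.find('-')+1:]
--         chars = set(horario)
--         if chars & vistos:
--             return True
--         vistos |= chars
--     return False
-- ===== Notes on version B (the rewrite author's own statement) =====
-- stated objective: faster
-- what changed: Replaced the quadratic nested pairwise loops (with substring membership tests) by a single pass that accumulates a set of previously seen characters and checks each item's character set against it.
import Mathlib
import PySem

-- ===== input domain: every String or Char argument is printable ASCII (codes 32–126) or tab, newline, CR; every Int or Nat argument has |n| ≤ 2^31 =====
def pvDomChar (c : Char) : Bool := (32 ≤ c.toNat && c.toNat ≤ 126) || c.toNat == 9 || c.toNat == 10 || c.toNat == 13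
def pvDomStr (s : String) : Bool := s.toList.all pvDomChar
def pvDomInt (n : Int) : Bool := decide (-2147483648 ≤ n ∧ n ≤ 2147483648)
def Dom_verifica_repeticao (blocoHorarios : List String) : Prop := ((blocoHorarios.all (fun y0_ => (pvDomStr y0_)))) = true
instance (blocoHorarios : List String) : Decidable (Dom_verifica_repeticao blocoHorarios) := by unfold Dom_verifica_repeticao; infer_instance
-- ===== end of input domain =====

-- B replaces A's O(n²·L²) pairwise scanning with one accumulating pass over a set
-- of previously seen time-substring characters (objective: faster).

-- ===== PORT A =====
-- item[item.find('-')+1:] on code points (exact: PySem slice and find)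
def pvExtract (item : String) : List Char :=
  PySem.List.slice item.toList (some (PySem.Str.find item "-" + 1)) none

-- the nested 'for i … for j in range(i+1,…)' loops: head vs rest, then recurse
def pvPairLoop : List (List Char) → Bool
  | [] => false
  | h :: t =>
    if t.any (fun s => h.any (fun c => PySem.Chars.isIn [c] s)) then true
    else pvPairLoop t

def verifica_repeticao (blocoHorarios : List String) : Bool :=
  let horarios := blocoHorarios.foldl (fun acc item => acc ++ [pvExtract item]) []
  pvPairLoop horarios

-- ===== PORT B =====
-- single pass: 'vistos' accumulates characters of earlier substrings
def pvBLoop (vistos : PySem.Set Char) : List String → Bool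
  | [] => false
  | item :: rest =>
    let chars : PySem.Set Char := PySem.Set.ofList (pvExtract item)
    if !(PySem.Set.inter chars vistos).isEmpty then true
    else pvBLoop (PySem.Set.union vistos chars) rest

def verifica_repeticao_alt (blocoHorarios : List String) : Bool :=
  pvBLoop PySem.Set.empty blocoHorarios

-- ===== PRECONDITION & SPEC =====
def Spec_verifica_repeticao (blocoHorarios : List String) (out : Bool) : Prop := out = verifica_repeticao_alt blocoHorarios
instance (blocoHorarios : List String) (out : Bool) : Decidable (Spec_verifica_repeticao blocoHorarios out) := by unfold Spec_verifica_repeticao; infer_instance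

-- ===== CLAIM (what is proved, stated in full; the proofs are below) =====
def Claim_equal_verifica_repeticao : Prop := ∀ (blocoHorarios : List String), Dom_verifica_repeticao blocoHorarios → Spec_verifica_repeticao blocoHorarios (verifica_repeticao blocoHorarios)

-- ===== LEMMAS AND PROOFS =====

-- A's 'char in horarios[j]' (a one-character substring test) is element membership
theorem pv_isIn_singleton (c : Char) (s : List Char) :
    PySem.Chars.isIn [c] s = true ↔ c ∈ s := by
  rw [PySem.Chars.isIn_iff_infix]
  constructor
  · intro h; exact h.mem (List.mem_singleton_self c)
  · intro h
    obtain ⟨pre, suf, hps⟩ := List.append_of_mem h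
    exact ⟨pre, suf, by simp [hps]⟩

theorem pv_pairLoop_iff (l : List (List Char)) :
    pvPairLoop l = true ↔ ∃ h t, l = h :: t ∧
      ((∃ s ∈ t, ∃ c ∈ h, c ∈ s) ∨ pvPairLoop t = true) := by
  cases l with
  | nil => simp [pvPairLoop]
  | cons h t =>
    simp only [pvPairLoop]
    split
    · rename_i hc
      simp only [List.any_eq_true, pv_isIn_singleton] at hc
      exact iff_of_true rfl ⟨h, t, rfl, Or.inl hc⟩
    · rename_i hc
      simp only [List.any_eq_true, pv_isIn_singleton] at hc
      constructor
      · intro hr; exact ⟨h, t, rfl, Or.inr hr⟩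
      · rintro ⟨h', t', heq, hor⟩
        obtain ⟨rfl, rfl⟩ : h' = h ∧ t' = t := by
          constructor <;> (injection heq <;> simp_all)
        rcases hor with hsh | hr
        · exact absurd hsh hc
        · exact hr

theorem pv_bLoop_iff (xs : List String) (V : PySem.Set Char) :
    pvBLoop V xs = true ↔
      (∃ x ∈ xs, ∃ c ∈ pvExtract x, c ∈ V) ∨
      pvPairLoop (xs.map pvExtract) = true := by
  induction xs generalizing V with
  | nil => simp [pvBLoop, pvPairLoop]
  | cons x t ih =>
    simp only [pvBLoop]
    by_cases hnow : ∃ c ∈ pvExtract x, c ∈ V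
    · obtain ⟨c, hc1, hc2⟩ := hnow
      have hne : ¬ (PySem.Set.inter (PySem.Set.ofList (pvExtract x)) V).isEmpty = true := by
        simp only [List.isEmpty_iff]
        intro hnil
        have : c ∈ PySem.Set.inter (PySem.Set.ofList (pvExtract x)) V := by
          rw [PySem.Set.mem_inter, PySem.Set.mem_ofList]
          exact ⟨hc1, hc2⟩
        simp [hnil] at this
      simp only [hne, Bool.not_false, if_true]
      exact iff_of_true trivial (Or.inl ⟨x, List.mem_cons_self, c, hc1, hc2⟩)
    · have hee : (PySem.Set.inter (PySem.Set.ofList (pvExtract x)) V).isEmpty = true := by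
        rw [List.isEmpty_iff, List.eq_nil_iff_forall_not_mem]
        intro c hcmem
        rw [PySem.Set.mem_inter, PySem.Set.mem_ofList] at hcmem
        exact hnow ⟨c, hcmem.1, hcmem.2⟩
      simp only [hee, Bool.not_true, if_neg Bool.false_ne_true]
      rw [ih]
      have hmemU : ∀ c, c ∈ PySem.Set.union V (PySem.Set.ofList (pvExtract x)) ↔
          c ∈ V ∨ c ∈ pvExtract x := by
        intro c; rw [PySem.Set.mem_union, PySem.Set.mem_ofList]
      constructor
      · rintro (⟨y, hy, c, hcy, hcV⟩ | hp)
        · rw [hmemU] at hcV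
          rcases hcV with hV | hx
          · exact Or.inl ⟨y, List.mem_cons_of_mem _ hy, c, hcy, hV⟩
          · refine Or.inr ((pv_pairLoop_iff _).mpr ⟨pvExtract x, t.map pvExtract, by simp, ?_⟩)
            exact Or.inl ⟨pvExtract y, List.mem_map_of_mem hy, c, hx, hcy⟩
        · exact Or.inr ((pv_pairLoop_iff _).mpr ⟨pvExtract x, t.map pvExtract, by simp, Or.inr hp⟩)
      · rintro (⟨y, hy, c, hcy, hV⟩ | hp)
        · rcases List.mem_cons.mp hy with rfl | hyt
          · exact absurd ⟨c, hcy, hV⟩ hnow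
          · exact Or.inl ⟨y, hyt, c, hcy, (hmemU c).mpr (Or.inl hV)⟩
        · obtain ⟨h', t', heq, hor⟩ := (pv_pairLoop_iff _).mp hp
          obtain ⟨rfl, rfl⟩ : h' = pvExtract x ∧ t' = t.map pvExtract := by
            constructor <;> (injection heq <;> simp_all)
          rcases hor with ⟨s, hs, c, hcx, hcs⟩ | hrest
          · obtain ⟨y, hy, rfl⟩ := List.mem_map.mp hs
            exact Or.inl ⟨y, hy, c, hcs, (hmemU c).mpr (Or.inr hcx)⟩
          · exact Or.inr hrest

-- ===== VERDICT (by name: the statement is the Claim_ definition above) =====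
theorem verifica_repeticao_spec : Claim_equal_verifica_repeticao := by
  intro xs _
  unfold Spec_verifica_repeticao verifica_repeticao verifica_repeticao_alt
  rw [PySem.List.foldl_append_singleton_eq_map]
  rw [Bool.eq_iff_iff, pv_bLoop_iff]
  simp [PySem.Set.empty]
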